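-- pv_equiv track=rewrite | github.com/skywil827/LLM_SelfDebug | index.py | _benchmark_task_counts_from_results
-- ===== SOURCE A (Python) =====
-- from typing import Dict, Any, Optional, Union, List, Literal, Tuple
--
-- def _benchmark_task_counts_from_results(all_results: List[tuple]) -> Dict[str, int]:
--     """
--     Returns {benchmark: N} where N is the maximum num_tasks observed for that benchmark
--     (across providers/models/modes). This reflects actual loaded tasks, not just max_tasks.
--     """
--     counts: Dict[str, int] = {}
--     for _, summary in all_results:
--         bench = summary.get("benchmark")
--         n = int(summary.get("num_tasks") or 0)
--         if bench:
--             counts[bench] = max(counts.get(bench, 0), n)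
--     return counts
-- ===== SOURCE B (Python) =====
-- def _benchmark_task_counts_from_results(all_results):
--     # Staged pipeline: flatten to (bench, n) pairs, dedupe benches in first-seen
--     # order, then answer each bench with a nested scan over the pairs list.
--     pairs = []
--     for _, summary in all_results:
--         bench = summary.get("benchmark")
--         n = int(summary.get("num_tasks") or 0)
--         if bench:
--             pairs.append((bench, n))
--     order = []
--     for b, _ in pairs:
--         if b not in order:
--             order.append(b)
--     return {b: max([n for bb, n in pairs if bb == b] + [0]) for b in order}
-- ===== Notes on version B (the rewrite author's own statement) =====
-- stated objective: alternative
-- what changed: Replaces A's single-pass running-max dict with a staged pipeline: flatten to a (bench, n) pair list, dedupe benchmarks in first-seen order, then compute each benchmark's count with a nested scan (max over the filtered pair list, floored at 0).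
import Mathlib
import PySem

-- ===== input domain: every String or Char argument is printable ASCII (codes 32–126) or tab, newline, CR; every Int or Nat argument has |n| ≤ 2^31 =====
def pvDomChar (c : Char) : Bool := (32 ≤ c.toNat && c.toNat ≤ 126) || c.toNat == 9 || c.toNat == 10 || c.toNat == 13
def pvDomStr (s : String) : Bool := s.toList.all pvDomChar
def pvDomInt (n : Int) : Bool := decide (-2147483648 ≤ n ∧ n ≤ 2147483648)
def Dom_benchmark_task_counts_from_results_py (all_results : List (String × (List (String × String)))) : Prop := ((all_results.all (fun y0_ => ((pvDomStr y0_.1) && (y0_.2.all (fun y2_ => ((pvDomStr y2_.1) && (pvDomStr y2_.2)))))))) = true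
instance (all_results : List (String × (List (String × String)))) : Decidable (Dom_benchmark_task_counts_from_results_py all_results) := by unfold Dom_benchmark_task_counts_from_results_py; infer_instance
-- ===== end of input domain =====

-- B replaces A's single-pass running-max dict with a staged pipeline (pair list,
-- first-seen bench order, nested max-scan per bench); alternative, not faster.


-- shared by both ports: n = int(summary.get("num_tasks") or 0)  (total form; Pre_ rules out ValueError)
def pvNumTasks (summary : PySem.Dict String String) : Int :=
  match summary.get? "num_tasks" with
  | none => 0
  | some s => if s = "" then 0 else (PySem.Int.ofStr? s).getD 0

-- ===== PORT A =====
-- loop body of A: counts[bench] = max(counts.get(bench, 0), n) when bench is truthy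
def pvStepA (counts : PySem.Dict String Int) (r : String × (List (String × String))) : PySem.Dict String Int :=
  let summary := PySem.Dict.ofList r.2
  let bench := summary.get? "benchmark"
  let n := pvNumTasks summary
  match bench with
  | some b => if b ≠ "" then counts.insert b (max (counts.getD b 0) n) else counts
  | none => counts

def benchmark_task_counts_from_results_py (all_results : List (String × (List (String × String)))) : List (String × Int) :=
  (all_results.foldl pvStepA PySem.Dict.empty).items

-- ===== PORT B =====
-- first loop of B: pairs.append((bench, n)) when bench is truthy
def pvPairsLoop (pairs : List (String × Int)) (r : String × (List (String × String))) : List (String × Int) :=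
  let summary := PySem.Dict.ofList r.2
  match summary.get? "benchmark" with
  | some b => if b ≠ "" then pairs ++ [(b, pvNumTasks summary)] else pairs
  | none => pairs

-- second loop of B: order.append(b) for first occurrences
def pvOrder (pairs : List (String × Int)) : List String :=
  pairs.foldl (fun order p => if p.1 ∈ order then order else order ++ [p.1]) []

-- B's comprehension: max([n for bb, n in pairs if bb == b] + [0])
def pvMaxOf (pairs : List (String × Int)) (b : String) : Int :=
  (((pairs.filter (fun (q : String × Int) => q.1 == b)).map Prod.snd) ++ [0]).foldl max 0

def benchmark_task_counts_from_results_py_alt (all_results : List (String × (List (String × String)))) : List (String × Int) :=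
  let pairs := all_results.foldl pvPairsLoop []
  (pvOrder pairs).map (fun b => (b, pvMaxOf pairs b))

-- ===== PRECONDITION & SPEC =====
-- Pre_ excludes exactly the inputs where Python's int() raises ValueError: a summary whose
-- "num_tasks" value is a nonempty string that does not parse as an int (both A and B raise there).
def Pre_benchmark_task_counts_from_results_py (all_results : List (String × (List (String × String)))) : Prop :=
  (all_results.all (fun p =>
    match (PySem.Dict.ofList p.2).get? "num_tasks" with
    | none => true
    | some s => s == "" || (PySem.Int.ofStr? s).isSome)) = true
instance (all_results : List (String × (List (String × String)))) : Decidable (Pre_benchmark_task_counts_from_results_py all_results) := by unfold Pre_benchmark_task_counts_from_results_py; infer_instance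

def pvWitness_benchmark_task_counts_from_results_py : (List (String × (List (String × String)))) :=
  [("openai/gpt-4", [("benchmark", "gsm8k"), ("num_tasks", "10")]),
   ("meta/llama", [("benchmark", "gsm8k"), ("num_tasks", "25")]),
   ("x", [("benchmark", ""), ("num_tasks", "")])]

def Spec_benchmark_task_counts_from_results_py (all_results : List (String × (List (String × String)))) (out : List (String × Int)) : Prop := out = benchmark_task_counts_from_results_py_alt all_results
instance (all_results : List (String × (List (String × String)))) (out : List (String × Int)) : Decidable (Spec_benchmark_task_counts_from_results_py all_results out) := by unfold Spec_benchmark_task_counts_from_results_py; infer_instance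

-- ===== CLAIM (what is proved, stated in full; the proofs are below) =====
def Claim_equal_benchmark_task_counts_from_results_py : Prop := ∀ (all_results : List (String × (List (String × String)))), Dom_benchmark_task_counts_from_results_py all_results → Pre_benchmark_task_counts_from_results_py all_results → Spec_benchmark_task_counts_from_results_py all_results (benchmark_task_counts_from_results_py all_results)

-- ===== LEMMAS AND PROOFS =====

-- A's loop body viewed on a flattened (bench, n) pair
def pvStepP (counts : PySem.Dict String Int) (p : String × Int) : PySem.Dict String Int :=
  counts.insert p.1 (max (counts.getD p.1 0) p.2)

theorem pvPairsLoop_eq (ps : List (String × Int)) (r : String × (List (String × String))) :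
    pvPairsLoop ps r = ps ++ pvPairsLoop [] r := by
  simp only [pvPairsLoop]
  split
  · split <;> simp
  · simp

theorem pvStepA_pairs (d : PySem.Dict String Int) (r : String × (List (String × String))) :
    pvStepA d r = (pvPairsLoop [] r).foldl pvStepP d := by
  simp only [pvStepA, pvPairsLoop]
  split
  · split <;> simp [pvStepP]
  · rfl

theorem pvPairsLoop_append (all : List (String × (List (String × String)))) (ps : List (String × Int)) :
    all.foldl pvPairsLoop ps = ps ++ all.foldl pvPairsLoop [] := by
  induction all generalizing ps with
  | nil => simp
  | cons r rest ih =>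
    rw [List.foldl_cons, List.foldl_cons, ih, ih (pvPairsLoop [] r), pvPairsLoop_eq,
        List.append_assoc]

theorem pvFoldA_eq_foldP (all : List (String × (List (String × String)))) (d : PySem.Dict String Int) :
    all.foldl pvStepA d = (all.foldl pvPairsLoop []).foldl pvStepP d := by
  induction all generalizing d with
  | nil => rfl
  | cons r rest ih =>
    rw [List.foldl_cons, List.foldl_cons, pvPairsLoop_append rest (pvPairsLoop [] r),
        List.foldl_append, ih, pvStepA_pairs]

theorem pvOrder_go (pairs : List (String × Int)) (s : List String) :
    pairs.foldl (fun order p => if p.1 ∈ order then order else order ++ [p.1]) s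
      = pairs.foldl (fun (t : PySem.Set String) p => t.add p.1) s := by
  induction pairs generalizing s with
  | nil => rfl
  | cons p rest ih =>
    simp only [List.foldl_cons]
    rw [PySem.Set.add_eq_ite]
    exact ih _

theorem pvOrder_eq_set (pairs : List (String × Int)) :
    pvOrder pairs = PySem.Set.ofList (pairs.map Prod.fst) := by
  have h : PySem.Set.ofList (pairs.map Prod.fst)
      = PySem.Set.update ([] : PySem.Set String) (pairs.map Prod.fst) := rfl
  rw [h, PySem.Set.update_map_eq_foldl_add]
  exact pvOrder_go pairs []

theorem pvOrder_nodup (pairs : List (String × Int)) : (pvOrder pairs).Nodup := by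
  rw [pvOrder_eq_set]; exact PySem.Set.nodup_ofList _

theorem mem_pvOrder (pairs : List (String × Int)) (b : String) :
    b ∈ pvOrder pairs ↔ b ∈ pairs.map Prod.fst := by
  rw [pvOrder_eq_set]; exact PySem.Set.mem_ofList _ _

theorem pvOrder_append (pairs : List (String × Int)) (p : String × Int) :
    pvOrder (pairs ++ [p]) =
      if p.1 ∈ pvOrder pairs then pvOrder pairs else pvOrder pairs ++ [p.1] := by
  unfold pvOrder
  rw [List.foldl_append]
  rfl

theorem pvMaxOf_append (pairs : List (String × Int)) (p : String × Int) (b : String) :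
    pvMaxOf (pairs ++ [p]) b =
      if p.1 = b then max (pvMaxOf pairs b) p.2 else pvMaxOf pairs b := by
  unfold pvMaxOf
  rw [List.filter_append]
  by_cases h : p.1 = b
  · rw [if_pos h]
    simp only [h, List.filter_cons, beq_self_eq_true, if_true, List.filter_nil,
      List.map_append, List.map_cons, List.map_nil, List.append_assoc,
      List.foldl_append, List.foldl_cons, List.foldl_nil]
    exact max_right_comm _ p.2 0
  · have h2 : ((p.1 : String) == b) = false := by simpa using h
    rw [if_neg h]
    simp [h2]

theorem pvMaxOf_not_mem (pairs : List (String × Int)) (b : String)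
    (h : b ∉ pairs.map Prod.fst) : pvMaxOf pairs b = 0 := by
  unfold pvMaxOf
  have hf : pairs.filter (fun (q : String × Int) => q.1 == b) = [] := by
    rw [List.filter_eq_nil_iff]
    intro q hq hqb
    exact h (List.mem_map.mpr ⟨q, hq, by simpa using hqb⟩)
  rw [hf]
  simp

-- the main invariant: the running-max dict over a pair list is B's order/max table
theorem pvFoldP_items (pairs : List (String × Int)) :
    (pairs.foldl pvStepP PySem.Dict.empty).items
      = (pvOrder pairs).map (fun b => (b, pvMaxOf pairs b)) := by
  induction pairs using List.reverseRecOn with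
  | nil => rfl
  | append_singleton qs p ih =>
    have hkeys : (qs.foldl pvStepP PySem.Dict.empty).keys = pvOrder qs := by
      simp only [PySem.Dict.keys, ih, List.map_map]
      simp [Function.comp_def]
    have hnd : (qs.foldl pvStepP PySem.Dict.empty).keys.Nodup := by
      rw [hkeys]; exact pvOrder_nodup qs
    rw [List.foldl_append, List.foldl_cons, List.foldl_nil]
    show ((qs.foldl pvStepP PySem.Dict.empty).insert p.1
        (max ((qs.foldl pvStepP PySem.Dict.empty).getD p.1 0) p.2)).items = _
    by_cases hmem : p.1 ∈ pvOrder qs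
    · -- existing key: in-place overwrite
      have hcont : (qs.foldl pvStepP PySem.Dict.empty).contains p.1 = true := by
        rw [PySem.Dict.contains_eq_decide_mem_keys, hkeys]; simpa using hmem
      have hgetD : (qs.foldl pvStepP PySem.Dict.empty).getD p.1 0 = pvMaxOf qs p.1 :=
        PySem.Dict.getD_of_mem_items _
          (by rw [ih]; exact List.mem_map.mpr ⟨p.1, hmem, rfl⟩) hnd 0
      rw [PySem.Dict.items_insert_of_contains _ _ hcont, ih, hgetD,
          pvOrder_append, if_pos hmem, List.map_map]
      apply List.map_congr_left
      intro b hb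
      by_cases hbp : b = p.1
      · subst hbp
        simp [pvMaxOf_append]
      · have h2 : ¬ (p.1 = b) := fun h => hbp h.symm
        simp [pvMaxOf_append, hbp, h2]
    · -- fresh key: appended at the end
      have hcont : (qs.foldl pvStepP PySem.Dict.empty).contains p.1 = false := by
        rw [PySem.Dict.contains_eq_decide_mem_keys, hkeys]; simpa using hmem
      have hgetD : (qs.foldl pvStepP PySem.Dict.empty).getD p.1 0 = 0 :=
        PySem.Dict.getD_of_not_contains _ 0 hcont
      have hq0 : pvMaxOf qs p.1 = 0 :=
        pvMaxOf_not_mem qs p.1 (by rwa [← mem_pvOrder])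
      rw [PySem.Dict.items_insert_of_not_contains _ _ hcont, ih, hgetD,
          pvOrder_append, if_neg hmem, List.map_append, List.map_cons, List.map_nil]
      congr 1
      · apply List.map_congr_left
        intro b hb
        have h2 : ¬ (p.1 = b) := fun h => hmem (h ▸ hb)
        simp [pvMaxOf_append, h2]
      · simp [pvMaxOf_append, hq0]

-- ===== VERDICT (by name: the statement is the Claim_ definition above) =====
theorem benchmark_task_counts_from_results_py_spec : Claim_equal_benchmark_task_counts_from_results_py := by
  intro all_results _ _
  unfold Spec_benchmark_task_counts_from_results_py
  unfold benchmark_task_counts_from_results_py benchmark_task_counts_from_results_py_alt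
  rw [pvFoldA_eq_foldP, pvFoldP_items]
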